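-- pv_equiv track=rewrite | github.com/danlapko/SlidesVideoSynch | run.py | remove_repeated_values_from_list
-- ===== SOURCE A (Python) =====
-- def remove_repeated_values_from_list(mylist):
--     filtered_list = []
--
--     for i, sublist in enumerate(mylist):
--
--         if 0 < i < len(mylist) - 1:
--             sublist_prev = mylist[i - 1]
--             sublist_next = mylist[i + 1]
--
--             if sublist_prev[1] == sublist[1] and sublist[1] == sublist_next[1]:
--                 continue
--
--         filtered_list.append(sublist)
--     return filtered_list
-- ===== SOURCE B (Python) =====
-- def remove_repeated_values_from_list(mylist):
--     # Two staged passes: run-length encode consecutive rows by their second field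
--     # (taken as the slice row[1:2]), then emit only the first and last row of
--     # each run; interior rows of a run are exactly those whose both neighbors
--     # share their second field.
--     runs = []
--     for row in mylist:
--         key = row[1:2]
--         if runs and runs[-1][0] == key:
--             runs[-1][1].append(row)
--         else:
--             runs.append((key, [row]))
--     out = []
--     for _, run in runs:
--         out.append(run[0])
--         if len(run) > 1:
--             out.append(run[-1])
--     return out
-- ===== Notes on version B (the rewrite author's own statement) =====
-- stated objective: alternative
-- what changed: Replaced A's indexed neighbor-triple test by a two-pass run-length encoding: consecutive rows are grouped into runs by their second field and only the first and last row of each run are emitted.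
import Mathlib
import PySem

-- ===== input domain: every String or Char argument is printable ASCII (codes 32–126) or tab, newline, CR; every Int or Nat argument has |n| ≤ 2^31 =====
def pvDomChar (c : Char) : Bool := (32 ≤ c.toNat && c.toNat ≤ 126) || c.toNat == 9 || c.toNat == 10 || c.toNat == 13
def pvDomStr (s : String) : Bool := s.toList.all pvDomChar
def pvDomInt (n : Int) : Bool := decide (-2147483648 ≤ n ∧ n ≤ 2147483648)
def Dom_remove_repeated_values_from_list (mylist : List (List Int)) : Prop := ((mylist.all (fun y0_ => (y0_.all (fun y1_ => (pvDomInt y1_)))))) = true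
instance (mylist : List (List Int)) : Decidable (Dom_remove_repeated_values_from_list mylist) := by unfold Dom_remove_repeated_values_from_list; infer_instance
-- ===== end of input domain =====

-- B replaces A's indexed neighbor-triple test by a two-pass run-length encoding over the
-- second fields, emitting only the first and last row of each run (objective: alternative).


-- ===== PORT A =====
-- one loop step of A (pyGetD is exact under Pre_: every indexed access is in range there)
def aStep (mylist : List (List Int)) (filtered_list : List (List Int)) (p : Int × List Int) : List (List Int) :=
  if 0 < p.1 ∧ p.1 < (mylist.length : Int) - 1 then
    let sublist_prev := PySem.List.pyGetD mylist (p.1 - 1) []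
    let sublist_next := PySem.List.pyGetD mylist (p.1 + 1) []
    if PySem.List.pyGetD sublist_prev 1 0 = PySem.List.pyGetD p.2 1 0 ∧
       PySem.List.pyGetD p.2 1 0 = PySem.List.pyGetD sublist_next 1 0 then
      filtered_list
    else filtered_list ++ [p.2]
  else filtered_list ++ [p.2]

def remove_repeated_values_from_list (mylist : List (List Int)) : List (List Int) :=
  (PySem.List.enumerate mylist).foldl (aStep mylist) []

-- ===== PORT B =====
-- key = row[1:2]
def keyOf (row : List Int) : List Int := PySem.List.slice row (some 1) (some 2)

-- first pass: push one row onto the run-length encoding (Python mutates runs[-1][1] in place)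
def bPush (runs : List (List Int × List (List Int))) (row : List Int) : List (List Int × List (List Int)) :=
  let key := keyOf row
  match runs.getLast? with
  | some l => if l.1 = key then runs.dropLast ++ [(l.1, l.2 ++ [row])] else runs ++ [(key, [row])]
  | none => runs ++ [(key, [row])]

-- second pass: emit run[0] and, if the run has more than one row, run[-1]
def bEmit (out : List (List Int)) (kr : List Int × List (List Int)) : List (List Int) :=
  let out1 := out ++ [PySem.List.pyGetD kr.2 0 []]
  if 1 < kr.2.length then out1 ++ [PySem.List.pyGetD kr.2 (-1) []] else out1

def remove_repeated_values_from_list_alt (mylist : List (List Int)) : List (List Int) :=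
  ((mylist.foldl bPush []).foldl bEmit [])

-- ===== PRECONDITION & SPEC =====
-- Pre_ excludes exactly the inputs where Python A raises IndexError: for lists of length >= 3
-- every non-last row needs a [1] element, and the last row needs one when the short-circuited
-- comparison of the two rows before it is true.
def Pre_remove_repeated_values_from_list (mylist : List (List Int)) : Prop :=
  3 ≤ mylist.length →
    ((∀ r ∈ mylist.dropLast, 2 ≤ r.length) ∧
     ((mylist.getD (mylist.length - 1) []).length < 2 →
        ¬ PySem.List.pyGetD (mylist.getD (mylist.length - 3) []) 1 0
          = PySem.List.pyGetD (mylist.getD (mylist.length - 2) []) 1 0))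
instance (mylist : List (List Int)) : Decidable (Pre_remove_repeated_values_from_list mylist) := by unfold Pre_remove_repeated_values_from_list; infer_instance

def pvWitness_remove_repeated_values_from_list : List (List Int) := [[0, 1], [2, 1], [3, 1], [4, 5]]

def Spec_remove_repeated_values_from_list (mylist : List (List Int)) (out : List (List Int)) : Prop := out = remove_repeated_values_from_list_alt mylist
instance (mylist : List (List Int)) (out : List (List Int)) : Decidable (Spec_remove_repeated_values_from_list mylist out) := by unfold Spec_remove_repeated_values_from_list; infer_instance

-- ===== CLAIM (what is proved, stated in full; the proofs are below) =====
def Claim_equal_remove_repeated_values_from_list : Prop := ∀ (mylist : List (List Int)), Dom_remove_repeated_values_from_list mylist → Pre_remove_repeated_values_from_list mylist → Spec_remove_repeated_values_from_list mylist (remove_repeated_values_from_list mylist)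

-- ===== LEMMAS AND PROOFS =====

-- value of a row's second field as A reads it
def vOf (row : List Int) : Int := PySem.List.pyGetD row 1 0

-- proof-side recursive characterisation of A's loop from index 1 on
def goAB (prev cur : List Int) : List (List Int) → List (List Int)
  | [] => [cur]
  | r :: rs =>
    if vOf prev = vOf cur ∧ vOf cur = vOf r then goAB cur r rs
    else cur :: goAB cur r rs

-- middle rows A keeps, neighbor-window view (prev passed by value)
def midB (prev cur : List Int) : List (List Int) → List (List Int)
  | [] => []
  | r :: rs =>
    if vOf prev = vOf cur ∧ vOf cur = vOf r then midB cur r rs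
    else cur :: midB cur r rs

-- middle rows B keeps, neighbor-window view over keys (prev passed as its key)
def midK (kprev : List Int) (cur : List Int) : List (List Int) → List (List Int)
  | [] => []
  | r :: rs =>
    if kprev = keyOf cur ∧ keyOf cur = keyOf r then midK (keyOf cur) r rs
    else cur :: midK (keyOf cur) r rs

-- proof-side recursive characterisation of B's first pass: the open run (k, run) absorbs rows
def consume (k : List Int) (run : List (List Int)) : List (List Int) → List (List Int × List (List Int))
  | [] => [(k, run)]
  | x :: xs => if k = keyOf x then consume k (run ++ [x]) xs else (k, run) :: consume (keyOf x) [x] xs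

-- what B's second pass emits for one run
def emitRun (kr : List Int × List (List Int)) : List (List Int) :=
  PySem.List.pyGetD kr.2 0 [] :: (if 1 < kr.2.length then [PySem.List.pyGetD kr.2 (-1) []] else [])

lemma getD_append_len {α : Type} (pre : List α) (x : α) (l : List α) (d : α) :
    (pre ++ x :: l).getD pre.length d = x := by
  induction pre with
  | nil => rfl
  | cons a as ih => simp only [List.cons_append, List.length_cons, List.getD_cons_succ]; exact ih

lemma loopA (mylist : List (List Int)) :
    ∀ (rest pre : List (List Int)) (prev cur : List Int) (acc : List (List Int)),
    mylist = pre ++ prev :: cur :: rest →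
    (PySem.List.enumerate (cur :: rest) ((pre.length : Int) + 1)).foldl (aStep mylist) acc
      = acc ++ goAB prev cur rest := by
  intro rest
  induction rest with
  | nil =>
    intro pre prev cur acc hm
    have hlen : (mylist.length : Int) = (pre.length : Int) + 2 := by
      subst hm; simp
    have hcond : ¬ (0 < (pre.length : Int) + 1 ∧ (pre.length : Int) + 1 < (mylist.length : Int) - 1) := by
      omega
    simp only [PySem.List.enumerate_cons, PySem.List.enumerate_nil, List.foldl_cons,
      List.foldl_nil, goAB, aStep, if_neg hcond]
  | cons r rs ih =>
    intro pre prev cur acc hm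
    have hlen : (mylist.length : Int) = (pre.length : Int) + 3 + rs.length := by
      subst hm; simp; omega
    have hcond : 0 < (pre.length : Int) + 1 ∧ (pre.length : Int) + 1 < (mylist.length : Int) - 1 := by
      constructor <;> omega
    have hprev : PySem.List.pyGetD mylist ((pre.length : Int) + 1 - 1) [] = prev := by
      have : (pre.length : Int) + 1 - 1 = ((pre.length : Nat) : Int) := by omega
      rw [this, PySem.List.pyGetD_natCast, hm, getD_append_len]
    have hnext : PySem.List.pyGetD mylist ((pre.length : Int) + 1 + 1) [] = r := by
      have : (pre.length : Int) + 1 + 1 = (((pre ++ [prev, cur]).length : Nat) : Int) := by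
        simp; omega
      rw [this, PySem.List.pyGetD_natCast, hm]
      have : pre ++ prev :: cur :: r :: rs = (pre ++ [prev, cur]) ++ r :: rs := by simp
      rw [this, getD_append_len]
    have hstep : aStep mylist acc ((pre.length : Int) + 1, cur)
        = if vOf prev = vOf cur ∧ vOf cur = vOf r then acc else acc ++ [cur] := by
      simp only [aStep, hprev, hnext, if_pos hcond, vOf]
      rfl
    have hm' : mylist = (pre ++ [prev]) ++ cur :: r :: rs := by simpa using hm
    have ih' := ih (pre ++ [prev]) cur r
    rw [PySem.List.enumerate_cons, List.foldl_cons, hstep]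
    have hidx : (pre.length : Int) + 1 + 1 = (((pre ++ [prev]).length : Nat) : Int) + 1 := by
      simp
    rw [hidx]
    by_cases h : vOf prev = vOf cur ∧ vOf cur = vOf r
    · rw [if_pos h, ih' acc hm', goAB, if_pos h]
    · rw [if_neg h, ih' (acc ++ [cur]) hm', goAB, if_neg h]
      simp

lemma goAB_eq_midB :
    ∀ (rest : List (List Int)) (prev cur : List Int),
    goAB prev cur rest = midB prev cur rest ++ [(cur :: rest).getLast (by simp)] := by
  intro rest
  induction rest with
  | nil => intro prev cur; simp [goAB, midB]
  | cons r rs ih =>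
    intro prev cur
    have hl : (cur :: r :: rs).getLast (by simp) = (r :: rs).getLast (by simp) :=
      List.getLast_cons _
    rw [goAB, midB, hl]
    by_cases h : vOf prev = vOf cur ∧ vOf cur = vOf r
    · rw [if_pos h, if_pos h, ih]
    · rw [if_neg h, if_neg h, ih]
      simp

-- keys of rows with at least two elements are the singleton of the second field
lemma keyOf_long {a b : Int} {t : List Int} : keyOf (a :: b :: t) = [b] := by
  show PySem.List.slice (a :: b :: t) (some 1) (some 2) = [b]
  rw [show (1 : Int) = ((1 : Nat) : Int) from rfl, show (2 : Int) = ((2 : Nat) : Int) from rfl,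
    PySem.List.slice_natCast]
  rfl

lemma vOf_long {a b : Int} {t : List Int} : vOf (a :: b :: t) = b := by
  show PySem.List.pyGetD (a :: b :: t) 1 0 = b
  rw [show (1 : Int) = ((1 : Nat) : Int) from rfl, PySem.List.pyGetD_natCast]
  rfl

lemma key_eq_iff {p c : List Int} (hp : 2 ≤ p.length) (hc : 2 ≤ c.length) :
    (keyOf p = keyOf c) ↔ (vOf p = vOf c) := by
  match p, c with
  | a :: b :: t, a' :: b' :: t' =>
    rw [keyOf_long, keyOf_long, vOf_long, vOf_long]
    simp

-- windows over values agree with windows over keys wherever A does not raise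
lemma midB_eq_midK :
    ∀ (rest : List (List Int)) (prev cur : List Int),
    2 ≤ prev.length → 2 ≤ cur.length →
    (∀ r ∈ rest.dropLast, 2 ≤ r.length) →
    (∀ x y z, [x, y, z] <:+ (prev :: cur :: rest) → z.length < 2 → ¬ vOf x = vOf y) →
    midB prev cur rest = midK (keyOf prev) cur rest := by
  intro rest
  induction rest with
  | nil => intro prev cur _ _ _ _; rfl
  | cons r rs ih =>
    intro prev cur hp hc hmid hlast
    have hcondeq : (vOf prev = vOf cur ∧ vOf cur = vOf r)
        ↔ (keyOf prev = keyOf cur ∧ keyOf cur = keyOf r) := by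
      rcases rs with _ | ⟨r', rs'⟩
      · -- r is the last row
        by_cases hr : 2 ≤ r.length
        · rw [key_eq_iff hp hc, key_eq_iff hc hr]
        · have hne : ¬ vOf prev = vOf cur :=
            hlast prev cur r (by exact List.suffix_refl _) (by omega)
          have hkne : ¬ keyOf prev = keyOf cur := by
            rw [key_eq_iff hp hc]; exact hne
          constructor
          · intro h; exact absurd h.1 hne
          · intro h; exact absurd h.1 hkne
      · have hr : 2 ≤ r.length := hmid r (by simp)
        rw [key_eq_iff hp hc, key_eq_iff hc hr]
    rcases rs with _ | ⟨r', rs'⟩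
    · rw [midB, midK]
      by_cases h : vOf prev = vOf cur ∧ vOf cur = vOf r
      · rw [if_pos h, if_pos (hcondeq.mp h)]; rfl
      · rw [if_neg h, if_neg (fun hk => h (hcondeq.mpr hk))]; rfl
    · have hr : 2 ≤ r.length := hmid r (by simp)
      have hmid' : ∀ x ∈ (r' :: rs').dropLast, 2 ≤ x.length := by
        intro x hx
        exact hmid x (by simp only [List.dropLast_cons₂, List.mem_cons]; right; exact hx)
      have hlast' : ∀ x y z, [x, y, z] <:+ (cur :: r :: r' :: rs') → z.length < 2 → ¬ vOf x = vOf y := by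
        intro x y z hs hz
        exact hlast x y z (hs.trans (List.suffix_cons _ _)) hz
      have ihr := ih cur r hc hr hmid' hlast'
      rw [midB, midK]
      by_cases h : vOf prev = vOf cur ∧ vOf cur = vOf r
      · rw [if_pos h, if_pos (hcondeq.mp h), ihr]
      · rw [if_neg h, if_neg (fun hk => h (hcondeq.mpr hk)), ihr]

-- B's second pass appends each run's emission
lemma foldl_bEmit :
    ∀ (runs : List (List Int × List (List Int))) (acc : List (List Int)),
    runs.foldl bEmit acc = acc ++ runs.flatMap emitRun := by
  intro runs
  induction runs with
  | nil => intro acc; simp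
  | cons kr rs ih =>
    intro acc
    have hstep : bEmit acc kr = acc ++ emitRun kr := by
      by_cases h : 1 < kr.2.length <;> simp [bEmit, emitRun, h]
    rw [List.foldl_cons, hstep, ih]
    simp

-- B's first pass with a nonempty accumulator is `consume` on the open last run
lemma foldl_bPush :
    ∀ (xs : List (List Int)) (done : List (List Int × List (List Int))) (k : List Int) (run : List (List Int)),
    xs.foldl bPush (done ++ [(k, run)]) = done ++ consume k run xs := by
  intro xs
  induction xs with
  | nil => intro done k run; simp [consume]
  | cons x xs ih =>
    intro done k run
    have hlast : (done ++ [(k, run)]).getLast? = some (k, run) := by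
      simp
    have hstep : bPush (done ++ [(k, run)]) x =
        if k = keyOf x then done ++ [(k, run ++ [x])]
        else (done ++ [(k, run)]) ++ [(keyOf x, [x])] := by
      simp only [bPush, hlast]
      by_cases h : k = keyOf x
      · rw [if_pos h, if_pos h, List.dropLast_concat]
      · rw [if_neg h, if_neg h]
    rw [List.foldl_cons, hstep, consume]
    by_cases h : k = keyOf x
    · rw [if_pos h, if_pos h, ih]
    · rw [if_neg h, if_neg h]
      have := ih (done ++ [(k, run)]) (keyOf x) [x]
      rw [this]
      simp

lemma emitRun_singleton (k : List Int) (x : List Int) : emitRun (k, [x]) = [x] := by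
  simp [emitRun, PySem.List.pyGetD_zero_cons]

lemma emitRun_long (k : List Int) (first cur : List Int) (body : List (List Int)) :
    emitRun (k, first :: body ++ [cur]) = [first, cur] := by
  have hlen : 1 < ((first :: body ++ [cur] : List (List Int))).length := by simp
  have hz : PySem.List.pyGetD (first :: body ++ [cur]) 0 [] = first := by
    simp [pysem]
  have hn : PySem.List.pyGetD (first :: body ++ [cur]) (-1) [] = cur := by
    rw [show first :: body ++ [cur] = (first :: body) ++ [cur] from by simp,
      PySem.List.pyGetD_neg_one_append_singleton]
  simp only [emitRun, if_pos hlen, hz, hn]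

-- joint characterisation of consume+emit: a singleton open run, and an open run of length >= 2
lemma consume_emit :
    ∀ (rest : List (List Int)),
    (∀ (first : List Int) (kprev : List Int), kprev ≠ keyOf first →
      (consume (keyOf first) [first] rest).flatMap emitRun
        = midK kprev first rest ++ [(first :: rest).getLast (by simp)]) ∧
    (∀ (first cur : List Int) (body : List (List Int)),
      (consume (keyOf cur) (first :: body ++ [cur]) rest).flatMap emitRun
        = first :: (midK (keyOf cur) cur rest ++ [(cur :: rest).getLast (by simp)])) := by
  intro rest
  induction rest with
  | nil =>
    constructor
    · intro first kprev hne
      simp [consume, emitRun_singleton, midK]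
    · intro first cur body
      show ([(keyOf cur, first :: body ++ [cur])].flatMap emitRun) = _
      rw [List.flatMap_cons, List.flatMap_nil,
        show emitRun (keyOf cur, first :: body ++ [cur]) = [first, cur] from
          emitRun_long _ _ _ _]
      simp [midK]
  | cons x xs ih =>
    obtain ⟨ihS, ihM⟩ := ih
    constructor
    · intro first kprev hne
      rw [consume]
      have hl : (first :: x :: xs).getLast (by simp) = (x :: xs).getLast (by simp) :=
        List.getLast_cons _
      by_cases h : keyOf first = keyOf x
      · rw [if_pos h, midK, if_neg (fun hk => hne hk.1), hl, h]
        simpa using ihM first x []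
      · rw [if_neg h, List.flatMap_cons, emitRun_singleton, ihS x (keyOf first) h,
          midK, if_neg (fun hk => h hk.2), hl]
        simp
    · intro first cur body
      rw [consume]
      have hl : (cur :: x :: xs).getLast (by simp) = (x :: xs).getLast (by simp) :=
        List.getLast_cons _
      by_cases h : keyOf cur = keyOf x
      · rw [if_pos h, midK, if_pos ⟨rfl, h⟩, hl, h]
        have hm : (first :: body ++ [cur]) ++ [x] = first :: (body ++ [cur]) ++ [x] := by simp
        rw [hm]
        exact ihM first x (body ++ [cur])
      · rw [if_neg h, List.flatMap_cons,
          show emitRun (keyOf cur, first :: body ++ [cur]) = [first, cur] from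
            emitRun_long _ _ _ _,
          ihS x (keyOf cur) h, midK, if_neg (fun hk => h hk.2), hl]
        simp

-- B's full result on a list with at least two rows
lemma alt_eq :
    ∀ (x y : List Int) (rest : List (List Int)),
    remove_repeated_values_from_list_alt (x :: y :: rest)
      = x :: (midK (keyOf x) y rest ++ [(y :: rest).getLast (by simp)]) := by
  intro x y rest
  unfold remove_repeated_values_from_list_alt
  have h0 : bPush [] x = [] ++ [(keyOf x, [x])] := by
    simp [bPush]
  rw [List.foldl_cons, h0, foldl_bPush, List.nil_append, foldl_bEmit, List.nil_append]
  rw [consume]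
  by_cases h : keyOf x = keyOf y
  · rw [if_pos h, h]
    simpa using (consume_emit rest).2 x y []
  · rw [if_neg h, List.flatMap_cons, emitRun_singleton,
      (consume_emit rest).1 y (keyOf x) h]
    simp

-- a length-3 suffix gives the last three rows via getD from the end
lemma suffix_getD (mylist : List (List Int)) (x y z : List Int)
    (h : [x, y, z] <:+ mylist) :
    mylist.getD (mylist.length - 3) [] = x ∧
    mylist.getD (mylist.length - 2) [] = y ∧
    mylist.getD (mylist.length - 1) [] = z := by
  obtain ⟨init, hinit⟩ := h
  have hn : mylist.length = init.length + 3 := by rw [← hinit]; simp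
  refine ⟨?_, ?_, ?_⟩
  · have : mylist.length - 3 = init.length := by omega
    rw [this, ← hinit]; exact getD_append_len init x _ []
  · have : mylist.length - 2 = (init ++ [x]).length := by simp; omega
    rw [this, ← hinit]
    have : init ++ x :: y :: z :: [] = (init ++ [x]) ++ y :: [z] := by simp
    rw [this]; exact getD_append_len _ y _ []
  · have : mylist.length - 1 = (init ++ [x, y]).length := by simp; omega
    rw [this, ← hinit]
    have : init ++ x :: y :: z :: [] = (init ++ [x, y]) ++ z :: [] := by simp
    rw [this]; exact getD_append_len _ z _ []

-- ===== VERDICT (by name: the statement is the Claim_ definition above) =====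
theorem remove_repeated_values_from_list_spec : Claim_equal_remove_repeated_values_from_list := by
  intro mylist _ hpre
  unfold Spec_remove_repeated_values_from_list
  match mylist with
  | [] => rfl
  | [x] =>
    show _ = remove_repeated_values_from_list_alt [x]
    have hb : remove_repeated_values_from_list_alt [x] = [x] := by
      unfold remove_repeated_values_from_list_alt
      simp [bPush, bEmit, PySem.List.pyGetD_zero_cons]
    rw [hb]; rfl
  | [x, y] =>
    show _ = remove_repeated_values_from_list_alt [x, y]
    have ha : remove_repeated_values_from_list [x, y] = [x, y] := by
      unfold remove_repeated_values_from_list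
      simp only [PySem.List.enumerate_cons, PySem.List.enumerate_nil, List.foldl_cons,
        List.foldl_nil]
      have h0 : aStep [x, y] [] ((0 : Int), x) = [x] := by simp [aStep]
      have h1 : aStep [x, y] [x] ((0 : Int) + 1, y) = [x, y] := by
        have hc : ¬ ((0 : Int) < 0 + 1 ∧ (0 : Int) + 1 < (([x, y] : List (List Int)).length : Int) - 1) := by
          norm_num
        simp only [aStep, if_neg hc]
        rfl
      rw [h0, h1]
    rw [ha, alt_eq]
    simp [midK]
  | x :: y :: r :: rest =>
    have hp3 : 3 ≤ (x :: y :: r :: rest).length := by simp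
    obtain ⟨hall, hlastcond⟩ := hpre hp3
    -- A's result
    unfold remove_repeated_values_from_list
    rw [PySem.List.enumerate_cons, List.foldl_cons]
    have h0 : aStep (x :: y :: r :: rest) [] ((0 : Int), x) = [x] := by
      simp [aStep]
    rw [h0]
    simp only [zero_add]
    have hA := loopA (x :: y :: r :: rest) (r :: rest) [] x y [x] (by simp)
    simp only [List.length_nil, Nat.cast_zero, zero_add] at hA
    rw [hA, goAB_eq_midB]
    -- bridge midB to midK
    have hx : 2 ≤ x.length := hall x (by simp [List.dropLast_cons₂])
    have hy : 2 ≤ y.length := hall y (by simp [List.dropLast_cons₂])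
    have hmid : ∀ s ∈ (r :: rest).dropLast, 2 ≤ s.length := by
      intro s hs
      apply hall
      rcases rest with _ | ⟨r', rest'⟩
      · simp at hs
      · simp only [List.dropLast_cons₂, List.mem_cons] at hs ⊢
        right; right; exact hs
    have hlast3 : ∀ a b c, [a, b, c] <:+ (x :: y :: r :: rest) → c.length < 2 → ¬ vOf a = vOf b := by
      intro a b c hs hc
      obtain ⟨ha', hb', hc'⟩ := suffix_getD _ a b c hs
      intro hv
      exact hlastcond (by rw [hc']; exact hc) (by rw [ha', hb']; exact hv)
    rw [midB_eq_midK (r :: rest) x y hx hy hmid hlast3, alt_eq]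
    simp
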